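-- pv_equiv track=rewrite | github.com/rodesousa/Cheikh | lib/patterns/pFile.py | convert_chmod
-- ===== SOURCE A (Python) =====
-- def convert_chmod(permision):
--     mode = r""
--     for i in str(permision):
--         if i == '0' : mode += '---'
--         if i == '1' : mode += '--x'
--         if i == '2' : mode += '-w-'
--         if i == '3' : mode += '-wx'
--         if i == '4' : mode += 'r--'
--         if i == '5' : mode += 'r-x'
--         if i == '6' : mode += 'rw-'
--         if i == '7' : mode += 'rwx'
--     return mode
-- ===== SOURCE B (Python) =====
-- def convert_chmod(permision):
--     triplets = []
--     for c in str(permision):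
--         if c in '01234567':
--             d = int(c)
--             triplets.append(('r' if d & 4 else '-') +
--                             ('w' if d & 2 else '-') +
--                             ('x' if d & 1 else '-'))
--     return ''.join(triplets)
-- ===== Notes on version B (the rewrite author's own statement) =====
-- stated objective: alternative
-- what changed: B keeps the pass over str(permision) but replaces A's eight-way if-cascade with bit arithmetic: each octal digit's rwx triplet is computed from its three permission bits (4/2/1) and the triplets are joined at the end instead of accumulated by string concatenation.
import Mathlib
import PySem

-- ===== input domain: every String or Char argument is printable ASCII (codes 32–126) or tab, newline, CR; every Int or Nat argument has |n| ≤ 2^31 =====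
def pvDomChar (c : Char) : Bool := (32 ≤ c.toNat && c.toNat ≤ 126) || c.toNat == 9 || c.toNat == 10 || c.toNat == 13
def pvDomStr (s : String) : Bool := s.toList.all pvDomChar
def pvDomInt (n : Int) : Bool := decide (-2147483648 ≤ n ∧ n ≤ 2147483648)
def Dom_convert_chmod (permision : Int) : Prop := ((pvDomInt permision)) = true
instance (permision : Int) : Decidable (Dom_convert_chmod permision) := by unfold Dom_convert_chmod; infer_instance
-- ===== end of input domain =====

-- B keeps the pass over str(permision) but computes each octal digit's triplet from its three
-- permission bits (4/2/1) instead of A's eight-way if-cascade, joining the triplets at the end.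

-- ===== PORT A =====
-- the loop body: the cascade of eight independent `if` statements, in A's order (strings as List Char)
def convA_step (mode : List Char) (i : Char) : List Char :=
  let mode := if i = '0' then mode ++ ['-','-','-'] else mode
  let mode := if i = '1' then mode ++ ['-','-','x'] else mode
  let mode := if i = '2' then mode ++ ['-','w','-'] else mode
  let mode := if i = '3' then mode ++ ['-','w','x'] else mode
  let mode := if i = '4' then mode ++ ['r','-','-'] else mode
  let mode := if i = '5' then mode ++ ['r','-','x'] else mode
  let mode := if i = '6' then mode ++ ['r','w','-'] else mode
  let mode := if i = '7' then mode ++ ['r','w','x'] else mode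
  mode

def convert_chmod (permision : Int) : String :=
  String.ofList ((PySem.Int.toChars permision).foldl convA_step [])

-- ===== PORT B =====
-- ('r' if d & 4 else '-') + ('w' if d & 2 else '-') + ('x' if d & 1 else '-')
def convB_trip (d : Nat) : List Char :=
  [if d &&& 4 ≠ 0 then 'r' else '-',
   if d &&& 2 ≠ 0 then 'w' else '-',
   if d &&& 1 ≠ 0 then 'x' else '-']

-- loop body: if c in '01234567': triplets.append(...)   (int(c) on a digit char = c.toNat - 48)
def convB_step (triplets : List (List Char)) (c : Char) : List (List Char) :=
  if c ∈ ['0','1','2','3','4','5','6','7'] then triplets ++ [convB_trip (c.toNat - 48)]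
  else triplets

def convert_chmod_alt (permision : Int) : String :=
  String.ofList (((PySem.Int.toChars permision).foldl convB_step []).flatten)

-- ===== PRECONDITION & SPEC =====
def Spec_convert_chmod (permision : Int) (out : String) : Prop := out = convert_chmod_alt permision
instance (permision : Int) (out : String) : Decidable (Spec_convert_chmod permision out) := by unfold Spec_convert_chmod; infer_instance

-- ===== CLAIM (what is proved, stated in full; the proofs are below) =====
def Claim_equal_convert_chmod : Prop := ∀ (permision : Int), Dom_convert_chmod permision → Spec_convert_chmod permision (convert_chmod permision)

-- ===== LEMMAS AND PROOFS =====

-- what one character contributes on B's side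
def convB_elem (c : Char) : List Char :=
  if c ∈ ['0','1','2','3','4','5','6','7'] then convB_trip (c.toNat - 48) else []

lemma convA_step_eq (acc : List Char) (c : Char) :
    convA_step acc c = acc ++ convB_elem c := by
  by_cases h : c ∈ ['0','1','2','3','4','5','6','7']
  · fin_cases h <;> simp [convA_step, convB_elem, convB_trip]
  · simp only [List.mem_cons, List.mem_singleton] at h
    push_neg at h
    obtain ⟨h0, h1, h2, h3, h4, h5, h6, h7⟩ := h
    simp [convA_step, convB_elem, h0, h1, h2, h3, h4, h5, h6, h7]

lemma convB_foldl_append (cs : List Char) :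
    ∀ parts, cs.foldl convB_step parts = parts ++ cs.foldl convB_step [] := by
  induction cs with
  | nil => simp
  | cons c cs ih =>
    intro parts
    simp only [List.foldl_cons]
    rw [ih (convB_step parts c), ih (convB_step [] c)]
    unfold convB_step
    split_ifs <;> simp

lemma fold_eq (cs : List Char) :
    ∀ acc, cs.foldl convA_step acc = acc ++ (cs.foldl convB_step []).flatten := by
  induction cs with
  | nil => simp
  | cons c cs ih =>
    intro acc
    simp only [List.foldl_cons]
    rw [ih, convA_step_eq, convB_foldl_append cs (convB_step [] c)]
    unfold convB_step convB_elem
    split_ifs <;> simp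

-- ===== VERDICT (by name: the statement is the Claim_ definition above) =====
theorem convert_chmod_spec : Claim_equal_convert_chmod := by
  intro n _
  unfold Spec_convert_chmod convert_chmod convert_chmod_alt
  rw [fold_eq]
  rfl
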